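-- pv_equiv track=rewrite | github.com/SoumitraMaity14/React | Dsa/weekly-practice/week4Practice.py | divisible_nonDivisible
-- ===== SOURCE A (Python) =====
-- def divisible_nonDivisible(n,m):
--     divisible_num=[]
--     non_divisible_num=[]
--     for i in range(1, n+1):
--         if i%m==0:
--             divisible_num.append(i)
--         else:
--             non_divisible_num.append(i)
--     return sum(non_divisible_num)-sum(divisible_num)
-- ===== SOURCE B (Python) =====
-- def divisible_nonDivisible(n, m):
--     if n < 1:
--         return 0
--     d = abs(m)
--     k = n // d
--     total = n * (n + 1) // 2
--     div_sum = d * k * (k + 1) // 2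
--     return total - 2 * div_sum
-- ===== Notes on version B (the rewrite author's own statement) =====
-- stated objective: faster
-- what changed: B replaces A's O(n) loop that appends each i in 1..n to one of two lists and sums them by O(1) closed-form arithmetic-series formulas (total n(n+1)//2 minus twice the sum of multiples of |m|).
import Mathlib
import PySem

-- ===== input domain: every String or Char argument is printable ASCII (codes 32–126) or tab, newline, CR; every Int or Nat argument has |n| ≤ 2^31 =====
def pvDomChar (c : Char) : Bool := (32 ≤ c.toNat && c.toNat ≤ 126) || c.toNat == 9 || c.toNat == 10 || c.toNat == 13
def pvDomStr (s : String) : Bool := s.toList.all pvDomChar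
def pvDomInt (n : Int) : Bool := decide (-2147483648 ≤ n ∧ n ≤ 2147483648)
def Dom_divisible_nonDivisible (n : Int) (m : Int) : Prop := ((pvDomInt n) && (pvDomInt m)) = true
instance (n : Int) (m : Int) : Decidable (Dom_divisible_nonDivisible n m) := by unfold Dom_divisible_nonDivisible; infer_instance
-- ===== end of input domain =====

-- B replaces A's loop over range(1, n+1) by closed arithmetic-series formulas (objective: faster).

-- ===== PORT A =====
-- A builds two lists (divisible / non-divisible) over range(1, n+1) and returns
-- sum(non_divisible) - sum(divisible).
def divisible_nonDivisible (n : Int) (m : Int) : Int :=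
  let r := (PySem.List.pyRange 1 (n + 1) 1).foldl
    (fun (acc : List Int × List Int) i =>
      if PySem.Int.mod i m = 0 then (acc.1 ++ [i], acc.2) else (acc.1, acc.2 ++ [i]))
    ([], [])
  r.2.sum - r.1.sum

-- ===== PORT B =====
-- B: total = n(n+1)//2; the multiples of d=|m| in 1..n sum to d*k*(k+1)//2 with k = n//d;
-- answer = total - 2*divSum.
def divisible_nonDivisible_alt (n : Int) (m : Int) : Int :=
  if n < 1 then 0
  else
    let d := |m|
    let k := PySem.Int.floordiv n d
    let total := PySem.Int.floordiv (n * (n + 1)) 2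
    let divSum := PySem.Int.floordiv (d * k * (k + 1)) 2
    total - 2 * divSum

-- ===== PRECONDITION & SPEC =====
-- Pre_ excludes exactly the inputs (m = 0 with n ≥ 1) on which A raises ZeroDivisionError
-- (i % 0 inside the loop); B raises there too (n // 0).
def Pre_divisible_nonDivisible (n : Int) (m : Int) : Prop := m ≠ 0 ∨ n < 1
instance (n : Int) (m : Int) : Decidable (Pre_divisible_nonDivisible n m) := by
  unfold Pre_divisible_nonDivisible; infer_instance

def pvWitness_divisible_nonDivisible : Int × Int := (10, 3)

def Spec_divisible_nonDivisible (n : Int) (m : Int) (out : Int) : Prop := out = divisible_nonDivisible_alt n m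
instance (n : Int) (m : Int) (out : Int) : Decidable (Spec_divisible_nonDivisible n m out) := by unfold Spec_divisible_nonDivisible; infer_instance

-- ===== CLAIM (what is proved, stated in full; the proofs are below) =====
def Claim_equal_divisible_nonDivisible : Prop := ∀ (n : Int) (m : Int), Dom_divisible_nonDivisible n m → Pre_divisible_nonDivisible n m → Spec_divisible_nonDivisible n m (divisible_nonDivisible n m)

-- ===== LEMMAS AND PROOFS =====

-- signed contribution of i to A's result: -i if m divides i, else i
def pvSgn (m i : Int) : Int := if PySem.Int.mod i m = 0 then -i else i

-- A's two-list fold, measured by (snd-sum minus fst-sum), accumulates pvSgn.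
lemma pvFoldA (m : Int) (l : List Int) (a b : List Int) :
    (let r := l.foldl
      (fun (acc : List Int × List Int) i =>
        if PySem.Int.mod i m = 0 then (acc.1 ++ [i], acc.2) else (acc.1, acc.2 ++ [i]))
      (a, b)
     r.2.sum - r.1.sum) = b.sum - a.sum + (l.map (pvSgn m)).sum := by
  induction l generalizing a b with
  | nil => simp
  | cons x xs ih =>
    simp only [List.foldl_cons, List.map_cons, List.sum_cons, pvSgn]
    split_ifs with h <;> rw [ih] <;> simp <;> ring

-- B's closed form as a function of n (the n ≥ 1 branch of B)
def pvF (m n : Int) : Int :=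
  PySem.Int.floordiv (n * (n + 1)) 2 -
    2 * PySem.Int.floordiv (|m| * PySem.Int.floordiv n |m| * (PySem.Int.floordiv n |m| + 1)) 2

-- how x / d changes when x grows by 1 (d > 0)
lemma pvStepDiv (d x : Int) (hd : 0 < d) :
    x / d = (x + 1) / d + (if d ∣ (x + 1) then -1 else 0) := by
  set q := (x + 1) / d with hq
  have hdec : d * q + (x + 1) % d = x + 1 := Int.mul_ediv_add_emod (x + 1) d
  have hr0 : 0 ≤ (x + 1) % d := Int.emod_nonneg _ (by omega)
  have hrlt : (x + 1) % d < d := Int.emod_lt_of_pos _ hd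
  by_cases hdvd : d ∣ (x + 1)
  · have hr : (x + 1) % d = 0 := Int.emod_eq_zero_of_dvd hdvd
    have h1 : d * q = x + 1 := by omega
    have hx' : x = (d - 1) + (q - 1) * d := by linear_combination -h1
    rw [if_pos hdvd, hx', Int.add_mul_ediv_right _ _ (by omega),
        Int.ediv_eq_zero_of_lt (by omega) (by omega)]
    ring
  · have hr : (x + 1) % d ≠ 0 := fun h => hdvd (Int.dvd_of_emod_eq_zero h)
    have hx' : x = ((x + 1) % d - 1) + q * d := by linear_combination -hdec
    rw [if_neg hdvd, hx', Int.add_mul_ediv_right _ _ (by omega),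
        Int.ediv_eq_zero_of_lt (by omega) (by omega)]
    ring

-- one step of the closed form: going from n = x to n = x + 1 adds pvSgn m (x+1)
lemma pvFstep (m x : Int) (hm : m ≠ 0) :
    pvF m (x + 1) = pvF m x + pvSgn m (x + 1) := by
  have hd : 0 < |m| := abs_pos.mpr hm
  unfold pvF pvSgn
  have hiff : PySem.Int.mod (x + 1) m = 0 ↔ |m| ∣ (x + 1) := by
    rw [PySem.Int.mod_eq_zero_iff_dvd]; exact (abs_dvd m (x + 1)).symm
  simp only [hiff]
  simp only [PySem.Int.floordiv_eq_ediv_of_pos hd, PySem.Int.floordiv_eq_ediv_of_pos (by omega : (0:Int) < 2)]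
  set d := |m| with hdd
  have hstep := pvStepDiv d x hd
  have e1 : (x + 1) * (x + 1 + 1) = x * (x + 1) + (x + 1) * 2 := by ring
  by_cases hdvd : d ∣ (x + 1)
  · rw [if_pos hdvd] at hstep ⊢
    have hmul : d * ((x + 1) / d) = x + 1 := Int.mul_ediv_cancel' hdvd
    rw [hstep]
    generalize hg : (x + 1) / d = q at hmul ⊢
    have e2 : d * q * (q + 1) = d * (q + -1) * (q + -1 + 1) + (x + 1) * 2 := by
      linear_combination 2 * hmul
    rw [e1, e2, Int.add_mul_ediv_right _ _ (by omega : (2:Int) ≠ 0),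
        Int.add_mul_ediv_right _ _ (by omega : (2:Int) ≠ 0)]
    ring
  · rw [if_neg hdvd] at hstep ⊢
    rw [hstep, add_zero]
    generalize (x + 1) / d = q
    rw [e1, Int.add_mul_ediv_right _ _ (by omega : (2:Int) ≠ 0)]
    ring

-- the signed sum over 1..N equals B's closed form
lemma pvClosed (m : Int) (hm : m ≠ 0) : ∀ N : Nat,
    ((PySem.List.pyRange 1 ((N : Int) + 1) 1).map (pvSgn m)).sum = pvF m N := by
  intro N
  induction N with
  | zero =>
    have hd : 0 < |m| := abs_pos.mpr hm
    rw [PySem.List.pyRange_one_eq_nil (by omega)]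
    simp [pvF, PySem.Int.floordiv_eq_ediv_of_pos hd]
  | succ N ih =>
    push_cast
    rw [PySem.List.pyRange_one_succ_right (by omega : (1:Int) ≤ (N:Int) + 1),
        List.map_append, List.sum_append, ih]
    simp only [List.map_cons, List.map_nil, List.sum_cons, List.sum_nil, add_zero]
    rw [pvFstep m (N:Int) hm]

-- ===== VERDICT (by name: the statement is the Claim_ definition above) =====
theorem divisible_nonDivisible_spec : Claim_equal_divisible_nonDivisible := by
  intro n m _ hpre
  unfold Spec_divisible_nonDivisible divisible_nonDivisible divisible_nonDivisible_alt
  by_cases hn : n < 1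
  · simp only [if_pos hn]
    rw [PySem.List.pyRange_one_eq_nil (by omega)]
    simp
  · have hm : m ≠ 0 := by rcases hpre with h | h; exact h; omega
    simp only [if_neg hn]
    rw [pvFoldA]
    have hN : n = ((n.toNat : Nat) : Int) := by omega
    rw [hN, pvClosed m hm n.toNat]
    simp [pvF]
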